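-- pv_equiv track=rewrite | github.com/zhouyi-xiaoxiao/london-cuts | scripts/brace_check.py | strip_and_count
-- ===== SOURCE A (Python) =====
-- def strip_and_count(src):
--     out = []
--     i = 0
--     n = len(src)
--     while i < n:
--         c = src[i]
--         if c == '/' and i + 1 < n and src[i+1] == '/':
--             j = src.find('\n', i)
--             i = j if j >= 0 else n
--             continue
--         if c == '/' and i + 1 < n and src[i+1] == '*':
--             j = src.find('*/', i + 2)
--             i = j + 2 if j >= 0 else n
--             continue
--         if c in "'\"":
--             q = c
--             i += 1
--             while i < n and src[i] != q:
--                 if src[i] == '\\' and i + 1 < n: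
--                     i += 2
--                 else:
--                     i += 1
--             i += 1
--             continue
--         if c == '`':
--             i += 1
--             while i < n:
--                 if src[i] == '\\' and i + 1 < n:
--                     i += 2
--                     continue
--                 if src[i] == '`':
--                     i += 1
--                     break
--                 if src[i] == '$' and i + 1 < n and src[i+1] == '{':
--                     out.append('{')
--                     i += 2
--                     d = 1
--                     while i < n and d > 0:
--                         ch = src[i]
--                         if ch == '{':
--                             d += 1
--                             out.append('{')
--                             i += 1
--                         elif ch == '}':
--                             d -= 1
--                             out.append('}')
--                             i += 1
--                         elif ch in "'\"":
--                             q = ch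
--                             i += 1
--                             while i < n and src[i] != q:
--                                 if src[i] == '\\' and i + 1 < n:
--                                     i += 2
--                                 else:
--                                     i += 1
--                             i += 1
--                         elif ch == '`':
--                             i += 1
--                             while i < n and src[i] != '`':
--                                 if src[i] == '\\' and i + 1 < n:
--                                     i += 2
--                                 else:
--                                     i += 1
--                             i += 1
--                         else:
--                             i += 1
--                     continue
--                 i += 1
--             continue
--         out.append(c)
--         i += 1
--     clean = ''.join(out)
--     return (
--         clean.count('{') - clean.count('}'),
--         clean.count('(') - clean.count(')'),
--         clean.count('[') - clean.count(']'),
--     )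
-- ===== SOURCE B (Python) =====
-- # One flat character-at-a-time state machine: instead of A's nested while-loops
-- # with index jumps plus a final join and six .count passes, B folds an explicit
-- # DFA step over the string, keeping three running bracket balances.
-- # States: ('code',), ('slash',), ('line',), ('block',), ('blockstar',),
-- #         ('str', q, esc, ret)   ret = 0: back to code, d >= 1: back to ('expr', d)
-- #         ('tmpl', esc), ('dollar',), ('expr', d)
--
--
-- def _code_step(c, cu, pa, sq):
--     """Handle c as plain top-level code; returns (state, cu, pa, sq)."""
--     if c == '/':
--         return ('slash',), cu, pa, sq
--     if c == "'" or c == '"':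
--         return ('str', c, False, 0), cu, pa, sq
--     if c == '`':
--         return ('tmpl', False), cu, pa, sq
--     return (('code',),
--             cu + (c == '{') - (c == '}'),
--             pa + (c == '(') - (c == ')'),
--             sq + (c == '[') - (c == ']'))
--
--
-- def _tmpl_step(c):
--     """Handle c as template-literal text (no escape pending); returns state."""
--     if c == '\\':
--         return ('tmpl', True)
--     if c == '`':
--         return ('code',)
--     if c == '$':
--         return ('dollar',)
--     return ('tmpl', False)
--
--
-- def strip_and_count(src):
--     st = ('code',)
--     cu = pa = sq = 0
--     for c in src:
--         tag = st[0]
--         if tag == 'code':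
--             st, cu, pa, sq = _code_step(c, cu, pa, sq)
--         elif tag == 'slash':
--             if c == '/':
--                 st = ('line',)
--             elif c == '*':
--                 st = ('block',)
--             else:
--                 st, cu, pa, sq = _code_step(c, cu, pa, sq)
--         elif tag == 'line':
--             if c == '\n':
--                 st = ('code',)
--         elif tag == 'block':
--             if c == '*':
--                 st = ('blockstar',)
--         elif tag == 'blockstar':
--             if c == '/':
--                 st = ('code',)
--             elif c != '*':
--                 st = ('block',)
--         elif tag == 'str':
--             _, q, esc, ret = st
--             if esc:
--                 st = ('str', q, False, ret)
--             elif c == q: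
--                 st = ('code',) if ret == 0 else ('expr', ret)
--             elif c == '\\':
--                 st = ('str', q, True, ret)
--         elif tag == 'tmpl':
--             if st[1]:          # escape pending
--                 st = ('tmpl', False)
--             else:
--                 st = _tmpl_step(c)
--         elif tag == 'dollar':
--             if c == '{':
--                 st = ('expr', 1)
--                 cu += 1
--             else:
--                 st = _tmpl_step(c)
--         else:                  # ('expr', d)
--             d = st[1]
--             if c == '{':
--                 st = ('expr', d + 1)
--                 cu += 1
--             elif c == '}':
--                 st = ('tmpl', False) if d - 1 == 0 else ('expr', d - 1)
--                 cu -= 1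
--             elif c == "'" or c == '"' or c == '`':
--                 st = ('str', c, False, d)
--     return (cu, pa, sq)
-- ===== Notes on version B (the rewrite author's own statement) =====
-- stated objective: alternative
-- what changed: B replaces A's nested index-jumping while-loops (with str.find skips, an out-list of kept characters, a final join and six .count passes) by one flat character-at-a-time DFA: an explicit tagged state folded over the string while three running bracket balances are updated in place.
import Mathlib
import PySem

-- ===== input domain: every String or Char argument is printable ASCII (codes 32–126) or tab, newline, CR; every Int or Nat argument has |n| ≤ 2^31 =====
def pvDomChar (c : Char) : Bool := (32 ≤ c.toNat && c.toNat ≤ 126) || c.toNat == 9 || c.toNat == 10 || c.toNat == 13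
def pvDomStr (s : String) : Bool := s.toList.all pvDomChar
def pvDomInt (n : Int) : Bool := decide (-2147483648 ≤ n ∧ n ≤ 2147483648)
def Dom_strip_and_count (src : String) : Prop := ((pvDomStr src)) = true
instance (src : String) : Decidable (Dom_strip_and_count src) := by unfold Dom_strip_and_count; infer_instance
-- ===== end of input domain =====

-- B replaces A's nested index-jumping while-loops plus a final join and six
-- .count passes by one flat explicit-state DFA folded over the characters,
-- keeping three running bracket balances (alternative decomposition).
-- Every while-loop of A is ported with a structural fuel parameter
-- (s.length + 1 steps always suffice, since each iteration advances the index
-- and the loops run only while the index < s.length): the fuel only makes the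
-- same computation total and is never exhausted on the loops' own runs.

-- ===== PORT A =====
-- A's escape-aware "skip until closing quote" while-loop:
-- while i < n and src[i] != q: if src[i] == '\\' and i+1 < n: i += 2 else: i += 1; then i += 1
def pvSkipStr (s : List Char) : Nat → Nat → Char → Nat
  | 0, i, _ => i + 1
  | fuel + 1, i, q =>
    if i < s.length then
      if s.getD i ' ' = q then i + 1
      else if s.getD i ' ' = '\\' ∧ i + 1 < s.length then pvSkipStr s fuel (i + 2) q
      else pvSkipStr s fuel (i + 1) q
    else i + 1

-- A's `while i < n and d > 0` loop inside `${`…`}` (appends only braces to out)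
def pvExprA (s : List Char) : Nat → Nat → Nat → List Char → Nat × List Char
  | 0, i, _, out => (i, out)
  | fuel + 1, i, d, out =>
    if i < s.length ∧ 0 < d then
      if s.getD i ' ' = '{' then pvExprA s fuel (i + 1) (d + 1) (out ++ ['{'])
      else if s.getD i ' ' = '}' then pvExprA s fuel (i + 1) (d - 1) (out ++ ['}'])
      else if s.getD i ' ' = '\'' ∨ s.getD i ' ' = '"' then
        pvExprA s fuel (pvSkipStr s (s.length + 1) (i + 1) (s.getD i ' ')) d out
      else if s.getD i ' ' = '`' then
        pvExprA s fuel (pvSkipStr s (s.length + 1) (i + 1) '`') d out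
      else pvExprA s fuel (i + 1) d out
    else (i, out)

-- A's backtick template-literal loop
def pvBtA (s : List Char) : Nat → Nat → List Char → Nat × List Char
  | 0, i, out => (i, out)
  | fuel + 1, i, out =>
    if i < s.length then
      if s.getD i ' ' = '\\' ∧ i + 1 < s.length then pvBtA s fuel (i + 2) out
      else if s.getD i ' ' = '`' then (i + 1, out)
      else if s.getD i ' ' = '$' ∧ i + 1 < s.length ∧ s.getD (i + 1) ' ' = '{' then
        let r := pvExprA s (s.length + 1) (i + 2) 1 (out ++ ['{'])
        pvBtA s fuel r.1 r.2
      else pvBtA s fuel (i + 1) out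
    else (i, out)

-- A's main while-loop: builds the list `out` of kept characters
def pvMainA (s : List Char) : Nat → Nat → List Char → List Char
  | 0, _, out => out
  | fuel + 1, i, out =>
    if i < s.length then
      if s.getD i ' ' = '/' ∧ i + 1 < s.length ∧ s.getD (i + 1) ' ' = '/' then
        -- j = src.find('\n', i); i = j if j >= 0 else n
        let j := PySem.Chars.findFrom s ['\n'] (i : Int) none
        pvMainA s fuel (if 0 ≤ j then j.toNat else s.length) out
      else if s.getD i ' ' = '/' ∧ i + 1 < s.length ∧ s.getD (i + 1) ' ' = '*' then
        -- j = src.find('*/', i + 2); i = j + 2 if j >= 0 else n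
        let j := PySem.Chars.findFrom s ['*', '/'] ((i : Int) + 2) none
        pvMainA s fuel (if 0 ≤ j then j.toNat + 2 else s.length) out
      else if s.getD i ' ' = '\'' ∨ s.getD i ' ' = '"' then
        pvMainA s fuel (pvSkipStr s (s.length + 1) (i + 1) (s.getD i ' ')) out
      else if s.getD i ' ' = '`' then
        let r := pvBtA s (s.length + 1) (i + 1) out
        pvMainA s fuel r.1 r.2
      else pvMainA s fuel (i + 1) (out ++ [s.getD i ' '])
    else out

def strip_and_count (src : String) : Int × Int × Int :=
  let clean := String.ofList (pvMainA src.toList (src.toList.length + 1) 0 [])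
  ((PySem.Str.count clean "{" : Int) - (PySem.Str.count clean "}" : Int),
   (PySem.Str.count clean "(" : Int) - (PySem.Str.count clean ")" : Int),
   (PySem.Str.count clean "[" : Int) - (PySem.Str.count clean "]" : Int))

-- ===== PORT B =====
-- B's DFA state, one constructor per tagged tuple of Source B
-- (`str q esc ret`: ret = 0 returns to code, ret = d ≥ 1 returns to expr d)
inductive PvSt where
  | code | slash | line | block | blockStar
  | str : Char → Bool → Int → PvSt
  | tmpl : Bool → PvSt
  | dollar
  | expr : Int → PvSt
deriving DecidableEq, Repr

-- Source B's _code_step (Python's bool arithmetic (c=='{') - (c=='}') as 0/1 ifs)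
def pvCodeStep (c : Char) (cu pa sq : Int) : PvSt × Int × Int × Int :=
  if c = '/' then (.slash, cu, pa, sq)
  else if c = '\'' ∨ c = '"' then (.str c false 0, cu, pa, sq)
  else if c = '`' then (.tmpl false, cu, pa, sq)
  else (.code,
    cu + ((if c = '{' then 1 else 0) - (if c = '}' then 1 else 0)),
    pa + ((if c = '(' then 1 else 0) - (if c = ')' then 1 else 0)),
    sq + ((if c = '[' then 1 else 0) - (if c = ']' then 1 else 0)))

-- Source B's _tmpl_step
def pvTmplStep (c : Char) : PvSt :=
  if c = '\\' then .tmpl true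
  else if c = '`' then .code
  else if c = '$' then .dollar
  else .tmpl false

-- one iteration of Source B's `for c in src` loop
def pvStep (a : PvSt × Int × Int × Int) (c : Char) : PvSt × Int × Int × Int :=
  match a with
  | (.code, cu, pa, sq) => pvCodeStep c cu pa sq
  | (.slash, cu, pa, sq) =>
      if c = '/' then (.line, cu, pa, sq)
      else if c = '*' then (.block, cu, pa, sq)
      else pvCodeStep c cu pa sq
  | (.line, cu, pa, sq) => (if c = '\n' then .code else .line, cu, pa, sq)
  | (.block, cu, pa, sq) => (if c = '*' then .blockStar else .block, cu, pa, sq)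
  | (.blockStar, cu, pa, sq) =>
      (if c = '/' then .code else if c ≠ '*' then .block else .blockStar, cu, pa, sq)
  | (.str q esc ret, cu, pa, sq) =>
      (if esc then .str q false ret
       else if c = q then (if ret = 0 then .code else .expr ret)
       else if c = '\\' then .str q true ret
       else .str q false ret, cu, pa, sq)
  | (.tmpl esc, cu, pa, sq) => (if esc then .tmpl false else pvTmplStep c, cu, pa, sq)
  | (.dollar, cu, pa, sq) =>
      if c = '{' then (.expr 1, cu + 1, pa, sq) else (pvTmplStep c, cu, pa, sq)
  | (.expr d, cu, pa, sq) =>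
      if c = '{' then (.expr (d + 1), cu + 1, pa, sq)
      else if c = '}' then ((if d - 1 = 0 then .tmpl false else .expr (d - 1)), cu - 1, pa, sq)
      else if c = '\'' ∨ c = '"' ∨ c = '`' then (.str c false d, cu, pa, sq)
      else (.expr d, cu, pa, sq)

def strip_and_count_alt (src : String) : Int × Int × Int :=
  (src.toList.foldl pvStep (.code, 0, 0, 0)).2

-- ===== PRECONDITION & SPEC =====
def Spec_strip_and_count (src : String) (out : Int × Int × Int) : Prop := out = strip_and_count_alt src
instance (src : String) (out : Int × Int × Int) : Decidable (Spec_strip_and_count src out) := by unfold Spec_strip_and_count; infer_instance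

-- ===== CLAIM (what is proved, stated in full; the proofs are below) =====
def Claim_equal_strip_and_count : Prop := ∀ (src : String), Dom_strip_and_count src → Spec_strip_and_count src (strip_and_count src)

-- ===== LEMMAS AND PROOFS =====

-- run B's DFA from state a over the suffix of s starting at i; final counters
def pvRun (s : List Char) (i : Nat) (a : PvSt × Int × Int × Int) : Int × Int × Int :=
  ((s.drop i).foldl pvStep a).2

theorem pvRun_succ (s : List Char) (i : Nat) (a : PvSt × Int × Int × Int) (h : i < s.length) :
    pvRun s i a = pvRun s (i + 1) (pvStep a (s.getD i ' ')) := by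
  unfold pvRun
  rw [List.drop_eq_getElem_cons h, List.foldl_cons, List.getD_eq_getElem s ' ' h]

theorem pvRun_ge (s : List Char) (i : Nat) (a : PvSt × Int × Int × Int) (h : s.length ≤ i) :
    pvRun s i a = a.2 := by
  unfold pvRun
  rw [List.drop_eq_nil_of_le h, List.foldl_nil]

-- the bracket balance of a character list, as an Int
def pvBal (a b : Char) (l : List Char) : Int := (l.count a : Int) - (l.count b : Int)

theorem pvBal_append (a b x : Char) (l : List Char) :
    pvBal a b (l ++ [x]) = pvBal a b l + (if x = a then 1 else 0) - (if x = b then 1 else 0) := by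
  simp only [pvBal, List.count_append, List.count_cons, List.count_nil, beq_iff_eq]
  push_cast
  split_ifs <;> ring

theorem pvBal_fst (a b : Char) (l : List Char) (hab : a ≠ b) :
    pvBal a b (l ++ [a]) = pvBal a b l + 1 := by
  rw [pvBal_append, if_pos rfl, if_neg hab]; ring

theorem pvBal_snd (a b : Char) (l : List Char) (hab : b ≠ a) :
    pvBal a b (l ++ [b]) = pvBal a b l - 1 := by
  rw [pvBal_append, if_neg hab, if_pos rfl]; ring

theorem pvBal_other (a b x : Char) (l : List Char) (hxa : x ≠ a) (hxb : x ≠ b) :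
    pvBal a b (l ++ [x]) = pvBal a b l := by
  rw [pvBal_append, if_neg hxa, if_neg hxb]; ring

theorem pvBal_open (l : List Char) : pvBal '{' '}' (l ++ ['{']) = pvBal '{' '}' l + 1 :=
  pvBal_fst '{' '}' l (by decide)

theorem pvBal_close (l : List Char) : pvBal '{' '}' (l ++ ['}']) = pvBal '{' '}' l - 1 :=
  pvBal_snd '{' '}' l (by decide)

theorem pvCount_append_other (l : List Char) (x c : Char) (hxc : x ≠ c) :
    (l ++ [x]).count c = l.count c := by
  have h' : ¬(c = x) := fun hh => hxc hh.symm
  simp [List.count_append, List.count_cons, hxc, h']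

-- A's expression loop appends only braces
theorem pvExprA_count (s : List Char) (fuel i d : Nat) (out : List Char) (c : Char)
    (h1 : c ≠ '{') (h2 : c ≠ '}') : (pvExprA s fuel i d out).2.count c = out.count c := by
  fun_induction pvExprA s fuel i d out
  case case1 i d out => rfl
  case case2 fuel i d out h hc ih =>
    rw [ih, pvCount_append_other out '{' c (fun hh => h1 hh.symm)]
  case case3 fuel i d out h hc hc2 ih =>
    rw [ih, pvCount_append_other out '}' c (fun hh => h2 hh.symm)]
  case case4 fuel i d out h hc hc2 hc3 ih => exact ih
  case case5 fuel i d out h hc hc2 hc3 hc4 ih => exact ih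
  case case6 fuel i d out h hc hc2 hc3 hc4 ih => exact ih
  case case7 fuel i d out h => rfl

-- A's template loop appends only braces
theorem pvBtA_count (s : List Char) (fuel i : Nat) (out : List Char) (c : Char)
    (h1 : c ≠ '{') (h2 : c ≠ '}') : (pvBtA s fuel i out).2.count c = out.count c := by
  fun_induction pvBtA s fuel i out
  case case1 i out => rfl
  case case2 fuel i out h hc ih => exact ih
  case case3 fuel i out h hc hc2 => rfl
  case case4 fuel i out h hc hc2 hc3 r ih =>
    rw [show r = pvExprA s (s.length + 1) (i + 2) 1 (out ++ ['{']) from rfl] at ih ⊢ ⊢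
    rw [ih, pvExprA_count s _ _ _ _ c h1 h2,
      pvCount_append_other out '{' c (fun hh => h1 hh.symm)]
  case case5 fuel i out h hc hc2 hc3 ih => exact ih
  case case6 fuel i out h => rfl

-- index lower bounds for A's loops (each loop only moves forward)
theorem pvSkipStr_ge (s : List Char) (fuel i : Nat) (q : Char) :
    i + 1 ≤ pvSkipStr s fuel i q := by
  fun_induction pvSkipStr s fuel i q <;> omega

theorem pvExprA_ge (s : List Char) (fuel i d : Nat) (out : List Char) :
    i ≤ (pvExprA s fuel i d out).1 := by
  fun_induction pvExprA s fuel i d out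
  case case4 fuel i d out h hc hc2 hc3 ih =>
    have := pvSkipStr_ge s (s.length + 1) (i + 1) (s.getD i ' '); omega
  case case5 fuel i d out h hc hc2 hc3 hc4 ih =>
    have := pvSkipStr_ge s (s.length + 1) (i + 1) '`'; omega
  all_goals omega

theorem pvBtA_ge (s : List Char) (fuel i : Nat) (out : List Char) :
    i ≤ (pvBtA s fuel i out).1 := by
  fun_induction pvBtA s fuel i out
  case case4 fuel i out h hc hc2 hc3 r ih =>
    have h1 := pvExprA_ge s (s.length + 1) (i + 2) 1 (out ++ ['{'])
    rw [show r = pvExprA s (s.length + 1) (i + 2) 1 (out ++ ['{']) from rfl] at ih ⊢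
    omega
  all_goals omega

theorem pvExprA_zero (s : List Char) (fuel i : Nat) (out : List Char) :
    pvExprA s fuel i 0 out = (i, out) := by
  cases fuel <;> simp [pvExprA]

theorem pvBtA_stop (s : List Char) (fuel i : Nat) (out : List Char) (h : s.length ≤ i) :
    pvBtA s fuel i out = (i, out) := by
  cases fuel <;> simp [pvBtA, Nat.not_lt.mpr h]

-- single- and two-character needles as getD facts
theorem pvPre1 (s : List Char) (a : Char) (t : Nat) :
    ([a] <+: s.drop t) ↔ (t < s.length ∧ s.getD t ' ' = a) := by
  constructor
  · rintro ⟨u, hu⟩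
    have hlen : t < s.length := by
      have := congrArg List.length hu
      simp [List.length_drop] at this
      omega
    refine ⟨hlen, ?_⟩
    have h0 : (s.drop t)[0]? = some a := by rw [← hu]; rfl
    rw [List.getElem?_drop] at h0
    simp at h0
    simp [List.getD_eq_getElem?_getD, h0]
  · rintro ⟨h1, h2⟩
    rw [List.drop_eq_getElem_cons h1]
    rw [List.getD_eq_getElem s ' ' h1] at h2
    exact ⟨s.drop (t + 1), by simp [h2]⟩

theorem pvPre2 (s : List Char) (a b : Char) (t : Nat) :
    ([a, b] <+: s.drop t) ↔
      (t + 1 < s.length ∧ s.getD t ' ' = a ∧ s.getD (t + 1) ' ' = b) := by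
  constructor
  · rintro ⟨u, hu⟩
    have hlen : t + 1 < s.length := by
      have := congrArg List.length hu
      simp [List.length_drop] at this
      omega
    have h0 : (s.drop t)[0]? = some a := by rw [← hu]; rfl
    have h1 : (s.drop t)[1]? = some b := by rw [← hu]; rfl
    rw [List.getElem?_drop] at h0 h1
    simp at h0 h1
    refine ⟨hlen, ?_, ?_⟩ <;> simp [List.getD_eq_getElem?_getD, h0, h1]
  · rintro ⟨h1, h2, h3⟩
    have ht : t < s.length := by omega
    rw [List.drop_eq_getElem_cons ht, List.drop_eq_getElem_cons h1]
    rw [List.getD_eq_getElem s ' ' ht] at h2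
    rw [List.getD_eq_getElem s ' ' h1] at h3
    exact ⟨s.drop (t + 2), by simp [h2, h3]⟩

theorem pvInfix_of_getD (s : List Char) (a : Char) (k p : Nat) (hk : k ≤ p)
    (hp : p < s.length) (ha : s.getD p ' ' = a) : [a] <:+: s.drop k := by
  have hpre : [a] <+: s.drop p := (pvPre1 s a p).mpr ⟨hp, ha⟩
  have hsfx : s.drop p <:+ s.drop k := by
    rw [show p = k + (p - k) by omega, ← List.drop_drop]
    exact List.drop_suffix _ _
  exact hpre.isInfix.trans hsfx.isInfix

theorem pvInfix2_of_getD (s : List Char) (a b : Char) (k p : Nat) (hk : k ≤ p)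
    (hp : p + 1 < s.length) (ha : s.getD p ' ' = a) (hb : s.getD (p + 1) ' ' = b) :
    [a, b] <:+: s.drop k := by
  have hpre : [a, b] <+: s.drop p := (pvPre2 s a b p).mpr ⟨hp, ha, hb⟩
  have hsfx : s.drop p <:+ s.drop k := by
    rw [show p = k + (p - k) by omega, ← List.drop_drop]
    exact List.drop_suffix _ _
  exact hpre.isInfix.trans hsfx.isInfix

-- line-comment runs
theorem pvLineRun (s : List Char) (cnt : Int × Int × Int) (k m : Nat) (hkm : k ≤ m)
    (hm : m ≤ s.length) (hno : ∀ p, k ≤ p → p < m → s.getD p ' ' ≠ '\n') :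
    pvRun s k (.line, cnt) = pvRun s m (.line, cnt) := by
  obtain ⟨cu, pa, sq⟩ := cnt
  have H : ∀ dd kk, m - kk = dd → kk ≤ m →
      (∀ p, kk ≤ p → p < m → s.getD p ' ' ≠ '\n') →
      pvRun s kk (.line, (cu, pa, sq)) = pvRun s m (.line, (cu, pa, sq)) := by
    intro dd
    induction dd with
    | zero =>
      intro kk hdd hkm _
      have hkkm : kk = m := by omega
      subst hkkm
      rfl
    | succ dd ih =>
      intro kk hdd hkm hno'
      have hk : kk < m := by omega
      have hkn : kk < s.length := lt_of_lt_of_le hk hm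
      rw [pvRun_succ s kk _ hkn]
      have hstep : pvStep (PvSt.line, (cu, pa, sq)) (s.getD kk ' ') =
          (PvSt.line, (cu, pa, sq)) := by
        simp only [pvStep]
        rw [if_neg (hno' kk le_rfl hk)]
      rw [hstep]
      exact ih (kk + 1) (by omega) (by omega) (fun p hp hpm => hno' p (by omega) hpm)
  exact H (m - k) k rfl hkm hno

theorem pvLineRunAll (s : List Char) (cnt : Int × Int × Int) (k : Nat)
    (hno : ∀ p, k ≤ p → p < s.length → s.getD p ' ' ≠ '\n') :
    pvRun s k (.line, cnt) = cnt := by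
  obtain ⟨cu, pa, sq⟩ := cnt
  have H : ∀ dd kk, s.length - kk = dd →
      (∀ p, kk ≤ p → p < s.length → s.getD p ' ' ≠ '\n') →
      pvRun s kk (.line, (cu, pa, sq)) = (cu, pa, sq) := by
    intro dd
    induction dd with
    | zero => intro kk hdd _; rw [pvRun_ge s kk _ (by omega)]
    | succ dd ih =>
      intro kk hdd hno'
      have hkn : kk < s.length := by omega
      rw [pvRun_succ s kk _ hkn]
      have hstep : pvStep (PvSt.line, (cu, pa, sq)) (s.getD kk ' ') =
          (PvSt.line, (cu, pa, sq)) := by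
        simp only [pvStep]
        rw [if_neg (hno' kk le_rfl hkn)]
      rw [hstep]
      exact ih (kk + 1) (by omega) (fun p hp hpm => hno' p (by omega) hpm)
  exact H (s.length - k) k rfl hno

-- block-comment runs
theorem pvBlockRun (s : List Char) (cnt : Int × Int × Int) (k m : Nat) (hkm : k ≤ m)
    (hm : m + 1 < s.length) (ha : s.getD m ' ' = '*') (hb : s.getD (m + 1) ' ' = '/')
    (hno : ∀ p, k ≤ p → p < m → ¬(s.getD p ' ' = '*' ∧ s.getD (p + 1) ' ' = '/')) :
    pvRun s k (.block, cnt) = pvRun s (m + 2) (.code, cnt)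
      ∧ (s.getD k ' ' ≠ '/' → pvRun s k (.blockStar, cnt) = pvRun s (m + 2) (.code, cnt)) := by
  obtain ⟨cu, pa, sq⟩ := cnt
  have H : ∀ dd kk, m - kk = dd → kk ≤ m →
      (∀ p, kk ≤ p → p < m → ¬(s.getD p ' ' = '*' ∧ s.getD (p + 1) ' ' = '/')) →
      pvRun s kk (.block, (cu, pa, sq)) = pvRun s (m + 2) (.code, (cu, pa, sq))
        ∧ (s.getD kk ' ' ≠ '/' →
            pvRun s kk (.blockStar, (cu, pa, sq)) = pvRun s (m + 2) (.code, (cu, pa, sq))) := by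
    intro dd
    induction dd with
    | zero =>
      intro kk hdd hkm' _
      have hkk : kk = m := by omega
      subst hkk
      have h1 : kk < s.length := by omega
      have h2 : kk + 1 < s.length := by omega
      have e1 : pvStep (PvSt.block, (cu, pa, sq)) (s.getD kk ' ') =
          (PvSt.blockStar, (cu, pa, sq)) := by
        simp only [pvStep]; rw [if_pos ha]
      have e1' : pvStep (PvSt.blockStar, (cu, pa, sq)) (s.getD kk ' ') =
          (PvSt.blockStar, (cu, pa, sq)) := by
        simp only [pvStep]; rw [ha]; simp
      have e2 : pvStep (PvSt.blockStar, (cu, pa, sq)) (s.getD (kk + 1) ' ') =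
          (PvSt.code, (cu, pa, sq)) := by
        simp only [pvStep]; rw [if_pos hb]
      constructor
      · rw [pvRun_succ s kk _ h1, e1, pvRun_succ s (kk + 1) _ h2, e2]
      · intro _
        rw [pvRun_succ s kk _ h1, e1', pvRun_succ s (kk + 1) _ h2, e2]
    | succ dd ih =>
      intro kk hdd hkm' hno'
      have hk : kk < m := by omega
      have hkn : kk < s.length := by omega
      have hnext : s.getD kk ' ' = '*' → s.getD (kk + 1) ' ' ≠ '/' := by
        intro hstar hsl
        exact hno' kk le_rfl hk ⟨hstar, hsl⟩
      have ihh := ih (kk + 1) (by omega) (by omega) (fun p hp hpm => hno' p (by omega) hpm)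
      constructor
      · rw [pvRun_succ s kk _ hkn]
        by_cases hc : s.getD kk ' ' = '*'
        · have hstep : pvStep (PvSt.block, (cu, pa, sq)) (s.getD kk ' ') =
              (PvSt.blockStar, (cu, pa, sq)) := by
            simp only [pvStep]; rw [if_pos hc]
          rw [hstep]
          exact ihh.2 (hnext hc)
        · have hstep : pvStep (PvSt.block, (cu, pa, sq)) (s.getD kk ' ') =
              (PvSt.block, (cu, pa, sq)) := by
            simp only [pvStep]; rw [if_neg hc]
          rw [hstep]
          exact ihh.1
      · intro hG
        rw [pvRun_succ s kk _ hkn]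
        by_cases hc : s.getD kk ' ' = '*'
        · have hstep : pvStep (PvSt.blockStar, (cu, pa, sq)) (s.getD kk ' ') =
              (PvSt.blockStar, (cu, pa, sq)) := by
            simp only [pvStep]; rw [hc]; simp
          rw [hstep]
          exact ihh.2 (hnext hc)
        · have hstep : pvStep (PvSt.blockStar, (cu, pa, sq)) (s.getD kk ' ') =
              (PvSt.block, (cu, pa, sq)) := by
            simp only [pvStep]; rw [if_neg hG, if_pos hc]
          rw [hstep]
          exact ihh.1
  exact H (m - k) k rfl hkm hno

theorem pvBlockRunAll (s : List Char) (cnt : Int × Int × Int) (k : Nat)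
    (hno : ∀ p, k ≤ p → p + 1 < s.length →
      ¬(s.getD p ' ' = '*' ∧ s.getD (p + 1) ' ' = '/')) :
    pvRun s k (.block, cnt) = cnt
      ∧ (s.getD k ' ' ≠ '/' → pvRun s k (.blockStar, cnt) = cnt) := by
  obtain ⟨cu, pa, sq⟩ := cnt
  have H : ∀ dd kk, s.length - kk = dd →
      (∀ p, kk ≤ p → p + 1 < s.length →
        ¬(s.getD p ' ' = '*' ∧ s.getD (p + 1) ' ' = '/')) →
      pvRun s kk (.block, (cu, pa, sq)) = (cu, pa, sq)
        ∧ (s.getD kk ' ' ≠ '/' → pvRun s kk (.blockStar, (cu, pa, sq)) = (cu, pa, sq)) := by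
    intro dd
    induction dd with
    | zero =>
      intro kk hdd _
      exact ⟨pvRun_ge s kk _ (by omega), fun _ => pvRun_ge s kk _ (by omega)⟩
    | succ dd ih =>
      intro kk hdd hno'
      have hkn : kk < s.length := by omega
      have hnext : s.getD kk ' ' = '*' → s.getD (kk + 1) ' ' ≠ '/' := by
        intro hstar hsl
        by_cases h2 : kk + 1 < s.length
        · exact hno' kk le_rfl h2 ⟨hstar, hsl⟩
        · rw [List.getD_eq_default s ' ' (by omega)] at hsl
          exact absurd hsl (by decide)
      have ihh := ih (kk + 1) (by omega) (fun p hp hpm => hno' p (by omega) hpm)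
      constructor
      · rw [pvRun_succ s kk _ hkn]
        by_cases hc : s.getD kk ' ' = '*'
        · have hstep : pvStep (PvSt.block, (cu, pa, sq)) (s.getD kk ' ') =
              (PvSt.blockStar, (cu, pa, sq)) := by
            simp only [pvStep]; rw [if_pos hc]
          rw [hstep]
          exact ihh.2 (hnext hc)
        · have hstep : pvStep (PvSt.block, (cu, pa, sq)) (s.getD kk ' ') =
              (PvSt.block, (cu, pa, sq)) := by
            simp only [pvStep]; rw [if_neg hc]
          rw [hstep]
          exact ihh.1
      · intro hG
        rw [pvRun_succ s kk _ hkn]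
        by_cases hc : s.getD kk ' ' = '*'
        · have hstep : pvStep (PvSt.blockStar, (cu, pa, sq)) (s.getD kk ' ') =
              (PvSt.blockStar, (cu, pa, sq)) := by
            simp only [pvStep]; rw [hc]; simp
          rw [hstep]
          exact ihh.2 (hnext hc)
        · have hstep : pvStep (PvSt.blockStar, (cu, pa, sq)) (s.getD kk ' ') =
              (PvSt.block, (cu, pa, sq)) := by
            simp only [pvStep]; rw [if_neg hG, if_pos hc]
          rw [hstep]
          exact ihh.1
  exact H (s.length - k) k rfl hno

-- the shared string-skip loop, DFA side
theorem pvSkipRun (s : List Char) (fuel i : Nat) (q : Char) (ret : Int)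
    (cu pa sq : Int) :
    s.length ≤ i + fuel →
    pvRun s i (.str q false ret, (cu, pa, sq)) =
      pvRun s (pvSkipStr s fuel i q)
        ((if ret = 0 then PvSt.code else .expr ret), (cu, pa, sq)) := by
  fun_induction pvSkipStr s fuel i q
  case case1 =>
    rename_i i q
    intro hf
    rw [pvRun_ge _ _ _ (by omega), pvRun_ge _ _ _ (by omega)]
  case case2 =>
    rename_i fuel i h
    intro hf
    rw [pvRun_succ s i _ h]
    have e : pvStep (PvSt.str (s.getD i ' ') false ret, (cu, pa, sq)) (s.getD i ' ') =
        ((if ret = 0 then PvSt.code else PvSt.expr ret), (cu, pa, sq)) := by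
      simp [pvStep]
    rw [e]
  case case3 =>
    rename_i fuel i q h hq hbs ih
    intro hf
    rw [pvRun_succ s i _ h]
    have e1 : pvStep (PvSt.str q false ret, (cu, pa, sq)) (s.getD i ' ') =
        (PvSt.str q true ret, (cu, pa, sq)) := by
      simp only [pvStep]
      rw [if_neg (by simp), if_neg hq, if_pos hbs.1]
    rw [e1, pvRun_succ s (i + 1) _ hbs.2]
    have e2 : pvStep (PvSt.str q true ret, (cu, pa, sq)) (s.getD (i + 1) ' ') =
        (PvSt.str q false ret, (cu, pa, sq)) := by
      simp [pvStep]
    rw [e2]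
    exact ih (by omega)
  case case4 =>
    rename_i fuel i q h hq hc2 ih
    intro hf
    by_cases hb : s.getD i ' ' = '\\'
    · have hn : ¬(i + 1 < s.length) := fun hh => hc2 ⟨hb, hh⟩
      rw [pvRun_succ s i _ h]
      have e1 : pvStep (PvSt.str q false ret, (cu, pa, sq)) (s.getD i ' ') =
          (PvSt.str q true ret, (cu, pa, sq)) := by
        simp only [pvStep]
        rw [if_neg (by simp), if_neg hq, if_pos hb]
      rw [e1, pvRun_ge _ _ _ (by omega),
        pvRun_ge _ _ _ (by have := pvSkipStr_ge s fuel (i + 1) q; omega)]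
    · rw [pvRun_succ s i _ h]
      have e : pvStep (PvSt.str q false ret, (cu, pa, sq)) (s.getD i ' ') =
          (PvSt.str q false ret, (cu, pa, sq)) := by
        simp only [pvStep]
        rw [if_neg (by simp), if_neg hq, if_neg hb]
      rw [e]
      exact ih (by omega)
  case case5 =>
    rename_i fuel i q h
    intro hf
    rw [pvRun_ge _ _ _ (by omega), pvRun_ge _ _ _ (by omega)]

-- A's ${...} expression loop, DFA side
theorem pvExprRun (s : List Char) (fuel i d : Nat) (out : List Char) :
    0 < d → ∀ cu pa sq : Int, s.length ≤ i + fuel →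
    pvRun s i (.expr (d : Int), (cu, pa, sq)) =
      pvRun s (pvExprA s fuel i d out).1
        (.tmpl false,
          (cu + pvBal '{' '}' (pvExprA s fuel i d out).2 - pvBal '{' '}' out, pa, sq)) := by
  fun_induction pvExprA s fuel i d out
  case case1 i d out =>
    intro hd cu pa sq hf
    rw [pvRun_ge _ _ _ (by omega), pvRun_ge _ _ _ (by omega)]
    exact Prod.ext (by ring) rfl
  case case2 fuel i d out h hc ih =>
    intro hd cu pa sq hf
    rw [pvRun_succ s i _ h.1]
    have e : pvStep (PvSt.expr (d : Int), (cu, pa, sq)) (s.getD i ' ') =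
        (PvSt.expr ((d : Int) + 1), (cu + 1, pa, sq)) := by
      simp only [pvStep]; rw [if_pos hc]
    rw [e, show ((d : Int) + 1) = (((d + 1 : Nat)) : Int) by push_cast; ring]
    rw [ih (by omega) (cu + 1) pa sq (by omega), pvBal_open]
    have ee : cu + 1 + pvBal '{' '}' (pvExprA s fuel (i + 1) (d + 1) (out ++ ['{'])).2 -
        (pvBal '{' '}' out + 1) =
        cu + pvBal '{' '}' (pvExprA s fuel (i + 1) (d + 1) (out ++ ['{'])).2 -
        pvBal '{' '}' out := by ring
    rw [ee]
  case case3 fuel i d out h hc hc2 ih =>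
    intro hd cu pa sq hf
    rw [pvRun_succ s i _ h.1]
    by_cases hd1 : d = 1
    · subst hd1
      have e : pvStep (PvSt.expr ((1 : Nat) : Int), (cu, pa, sq)) (s.getD i ' ') =
          (PvSt.tmpl false, (cu - 1, pa, sq)) := by
        simp only [pvStep]; rw [if_neg hc, if_pos hc2]; norm_num
      rw [e, show (1 : Nat) - 1 = 0 from rfl, pvExprA_zero, pvBal_close]
      have ee : cu + (pvBal '{' '}' out - 1) - pvBal '{' '}' out = cu - 1 := by ring
      rw [ee]
    · have e : pvStep (PvSt.expr (d : Int), (cu, pa, sq)) (s.getD i ' ') =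
          (PvSt.expr ((d : Int) - 1), (cu - 1, pa, sq)) := by
        simp only [pvStep]; rw [if_neg hc, if_pos hc2, if_neg (by omega)]
      rw [e, show ((d : Int) - 1) = (((d - 1 : Nat)) : Int) by omega]
      rw [ih (by omega) (cu - 1) pa sq (by omega), pvBal_close]
      have ee : cu - 1 + pvBal '{' '}' (pvExprA s fuel (i + 1) (d - 1) (out ++ ['}'])).2 -
          (pvBal '{' '}' out - 1) =
          cu + pvBal '{' '}' (pvExprA s fuel (i + 1) (d - 1) (out ++ ['}'])).2 -
          pvBal '{' '}' out := by ring
      rw [ee]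
  case case4 fuel i d out h hc hc2 hc3 ih =>
    intro hd cu pa sq hf
    rw [pvRun_succ s i _ h.1]
    have e : pvStep (PvSt.expr (d : Int), (cu, pa, sq)) (s.getD i ' ') =
        (PvSt.str (s.getD i ' ') false (d : Int), (cu, pa, sq)) := by
      simp only [pvStep]
      rw [if_neg hc, if_neg hc2,
        if_pos (hc3.elim (fun hh => Or.inl hh) (fun hh => Or.inr (Or.inl hh)))]
    rw [e, pvSkipRun s (s.length + 1) (i + 1) (s.getD i ' ') (d : Int) cu pa sq (by omega),
      if_neg (by omega : ¬((d : Int) = 0))]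
    have hge := pvSkipStr_ge s (s.length + 1) (i + 1) (s.getD i ' ')
    exact ih (by omega) cu pa sq (by omega)
  case case5 fuel i d out h hc hc2 hc3 hc4 ih =>
    intro hd cu pa sq hf
    rw [pvRun_succ s i _ h.1]
    have e : pvStep (PvSt.expr (d : Int), (cu, pa, sq)) (s.getD i ' ') =
        (PvSt.str '`' false (d : Int), (cu, pa, sq)) := by
      simp only [pvStep]
      rw [if_neg hc, if_neg hc2, if_pos (Or.inr (Or.inr hc4)), hc4]
    rw [e, pvSkipRun s (s.length + 1) (i + 1) '`' (d : Int) cu pa sq (by omega),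
      if_neg (by omega : ¬((d : Int) = 0))]
    have hge := pvSkipStr_ge s (s.length + 1) (i + 1) '`'
    exact ih (by omega) cu pa sq (by omega)
  case case6 fuel i d out h hc hc2 hc3 hc4 ih =>
    intro hd cu pa sq hf
    rw [pvRun_succ s i _ h.1]
    have e : pvStep (PvSt.expr (d : Int), (cu, pa, sq)) (s.getD i ' ') =
        (PvSt.expr (d : Int), (cu, pa, sq)) := by
      simp only [pvStep]
      rw [if_neg hc, if_neg hc2, if_neg (fun hor =>
        hor.elim (fun hh => hc3 (Or.inl hh))
          (fun hor2 => hor2.elim (fun hh => hc3 (Or.inr hh)) hc4))]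
    rw [e]
    exact ih (by omega) cu pa sq (by omega)
  case case7 fuel i d out h =>
    intro hd cu pa sq hf
    rw [pvRun_ge _ _ _ (by omega), pvRun_ge _ _ _ (by omega)]
    exact Prod.ext (by ring) rfl

-- A's template loop, DFA side
theorem pvBtRun (s : List Char) (fuel i : Nat) (out : List Char) :
    ∀ cu pa sq : Int, s.length ≤ i + fuel →
    pvRun s i (.tmpl false, (cu, pa, sq)) =
      pvRun s (pvBtA s fuel i out).1
        (.code,
          (cu + pvBal '{' '}' (pvBtA s fuel i out).2 - pvBal '{' '}' out, pa, sq)) := by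
  fun_induction pvBtA s fuel i out
  case case1 i out =>
    intro cu pa sq hf
    rw [pvRun_ge _ _ _ (by omega), pvRun_ge _ _ _ (by omega)]
    exact Prod.ext (by ring) rfl
  case case2 fuel i out h hc ih =>
    intro cu pa sq hf
    rw [pvRun_succ s i _ h]
    have e1 : pvStep (PvSt.tmpl false, (cu, pa, sq)) (s.getD i ' ') =
        (PvSt.tmpl true, (cu, pa, sq)) := by
      simp only [pvStep, pvTmplStep]
      rw [if_neg (by simp), if_pos hc.1]
    rw [e1, pvRun_succ s (i + 1) _ hc.2]
    have e2 : pvStep (PvSt.tmpl true, (cu, pa, sq)) (s.getD (i + 1) ' ') =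
        (PvSt.tmpl false, (cu, pa, sq)) := by
      simp [pvStep]
    rw [e2]
    exact ih cu pa sq (by omega)
  case case3 fuel i out h hc hc2 =>
    intro cu pa sq hf
    rw [pvRun_succ s i _ h]
    have e : pvStep (PvSt.tmpl false, (cu, pa, sq)) (s.getD i ' ') =
        (PvSt.code, (cu, pa, sq)) := by
      simp only [pvStep]
      rw [if_neg (by simp), hc2]
      simp [pvTmplStep]
    rw [e]
    exact congrArg (fun x : Int => pvRun s (i + 1) (PvSt.code, (x, pa, sq))) (by ring)
  case case4 fuel i out h hc hc2 hc3 r ih =>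
    intro cu pa sq hf
    rw [show r = pvExprA s (s.length + 1) (i + 2) 1 (out ++ ['{']) from rfl] at ih ⊢
    rw [pvRun_succ s i _ h]
    have e1 : pvStep (PvSt.tmpl false, (cu, pa, sq)) (s.getD i ' ') =
        (PvSt.dollar, (cu, pa, sq)) := by
      simp only [pvStep]
      rw [if_neg (by simp), hc3.1]
      simp [pvTmplStep]
    rw [e1, pvRun_succ s (i + 1) _ hc3.2.1]
    have e2 : pvStep (PvSt.dollar, (cu, pa, sq)) (s.getD (i + 1) ' ') =
        (PvSt.expr 1, (cu + 1, pa, sq)) := by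
      simp only [pvStep]
      rw [if_pos hc3.2.2]
    rw [e2, show i + 1 + 1 = i + 2 from rfl]
    have hpe := pvExprRun s (s.length + 1) (i + 2) 1 (out ++ ['{'])
      (by omega) (cu + 1) pa sq (by omega)
    simp only [Nat.cast_one] at hpe
    rw [hpe]
    have hge := pvExprA_ge s (s.length + 1) (i + 2) 1 (out ++ ['{'])
    rw [ih (cu + 1 + pvBal '{' '}' (pvExprA s (s.length + 1) (i + 2) 1 (out ++ ['{'])).2 -
        pvBal '{' '}' (out ++ ['{'])) pa sq (by omega), pvBal_open]
    exact congrArg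
      (fun x : Int => pvRun s (pvBtA s fuel
        (pvExprA s (s.length + 1) (i + 2) 1 (out ++ ['{'])).1
        (pvExprA s (s.length + 1) (i + 2) 1 (out ++ ['{'])).2).1 (PvSt.code, (x, pa, sq)))
      (by ring)
  case case5 fuel i out h hc hc2 hc3 ih =>
    intro cu pa sq hf
    by_cases hb : s.getD i ' ' = '\\'
    · have hn : ¬(i + 1 < s.length) := fun hh => hc ⟨hb, hh⟩
      rw [pvRun_succ s i _ h]
      have e1 : pvStep (PvSt.tmpl false, (cu, pa, sq)) (s.getD i ' ') =
          (PvSt.tmpl true, (cu, pa, sq)) := by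
        simp only [pvStep]
        rw [if_neg (by simp), hb]
        simp [pvTmplStep]
      rw [e1, pvRun_ge _ _ _ (by omega), pvBtA_stop s fuel (i + 1) out (by omega),
        pvRun_ge _ _ _ (by omega)]
      exact Prod.ext (by ring) rfl
    · by_cases hdol : s.getD i ' ' = '$'
      · have hnb : ¬(i + 1 < s.length ∧ s.getD (i + 1) ' ' = '{') :=
          fun hh => hc3 ⟨hdol, hh.1, hh.2⟩
        rw [pvRun_succ s i _ h]
        have e1 : pvStep (PvSt.tmpl false, (cu, pa, sq)) (s.getD i ' ') =
            (PvSt.dollar, (cu, pa, sq)) := by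
          simp only [pvStep]
          rw [if_neg (by simp), hdol]
          simp [pvTmplStep]
        rw [e1]
        by_cases hn2 : i + 1 < s.length
        · have hbr : s.getD (i + 1) ' ' ≠ '{' := fun hh => hnb ⟨hn2, hh⟩
          rw [pvRun_succ s (i + 1) _ hn2]
          have e2 : pvStep (PvSt.dollar, (cu, pa, sq)) (s.getD (i + 1) ' ') =
              (pvTmplStep (s.getD (i + 1) ' '), (cu, pa, sq)) := by
            simp only [pvStep]
            rw [if_neg hbr]
          have e3 : pvStep (PvSt.tmpl false, (cu, pa, sq)) (s.getD (i + 1) ' ') =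
              (pvTmplStep (s.getD (i + 1) ' '), (cu, pa, sq)) := by
            simp only [pvStep]
            rw [if_neg (by simp)]
          rw [e2, ← e3, ← pvRun_succ s (i + 1) _ hn2]
          exact ih cu pa sq (by omega)
        · rw [pvRun_ge _ _ _ (by omega), pvBtA_stop s fuel (i + 1) out (by omega),
            pvRun_ge _ _ _ (by omega)]
          exact Prod.ext (by ring) rfl
      · rw [pvRun_succ s i _ h]
        have e1 : pvStep (PvSt.tmpl false, (cu, pa, sq)) (s.getD i ' ') =
            (PvSt.tmpl false, (cu, pa, sq)) := by
          simp only [pvStep, pvTmplStep]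
          rw [if_neg (by simp), if_neg hb, if_neg hc2, if_neg hdol]
        rw [e1]
        exact ih cu pa sq (by omega)
  case case6 fuel i out h =>
    intro cu pa sq hf
    rw [pvRun_ge _ _ _ (by omega), pvRun_ge _ _ _ (by omega)]
    exact Prod.ext (by ring) rfl

-- A's main loop, DFA side
theorem pvMainRun (s : List Char) (fuel i : Nat) (out : List Char) :
    ∀ cu pa sq : Int, s.length ≤ i + fuel →
    pvRun s i (.code, (cu, pa, sq)) =
      (cu + pvBal '{' '}' (pvMainA s fuel i out) - pvBal '{' '}' out,
       pa + pvBal '(' ')' (pvMainA s fuel i out) - pvBal '(' ')' out,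
       sq + pvBal '[' ']' (pvMainA s fuel i out) - pvBal '[' ']' out) := by
  fun_induction pvMainA s fuel i out
  case case1 i out =>
    intro cu pa sq hf
    rw [pvRun_ge _ _ _ (by omega)]
    exact Prod.ext (by ring) (Prod.ext (by ring) (by ring))
  case case2 fuel i out h hc j ih =>
    intro cu pa sq hf
    rw [show j = PySem.Chars.findFrom s ['\n'] (i : Int) none from rfl] at ih ⊢
    rw [pvRun_succ s i _ h]
    have e1 : pvStep (PvSt.code, (cu, pa, sq)) (s.getD i ' ') =
        (PvSt.slash, (cu, pa, sq)) := by
      simp only [pvStep]; rw [hc.1]; simp [pvCodeStep]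
    rw [e1, pvRun_succ s (i + 1) _ hc.2.1]
    have e2 : pvStep (PvSt.slash, (cu, pa, sq)) (s.getD (i + 1) ' ') =
        (PvSt.line, (cu, pa, sq)) := by
      simp only [pvStep]; rw [if_pos hc.2.2]
    rw [e2]
    by_cases hj : PySem.Chars.findFrom s ['\n'] (i : Int) none = -1
    · have hni : ¬(['\n'] <:+: s.drop i) :=
        (PySem.Chars.findFrom_natCast_eq_neg_one_iff s ['\n'] i (by omega)).mp hj
      have hno : ∀ p, i + 2 ≤ p → p < s.length → s.getD p ' ' ≠ '\n' := by
        intro p hp hpn heq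
        exact hni (pvInfix_of_getD s '\n' i p (by omega) hpn heq)
      rw [pvLineRunAll s (cu, pa, sq) (i + 2) hno]
      rw [hj, if_neg (by norm_num)] at ih ⊢
      have hh := ih cu pa sq (by omega)
      rw [pvRun_ge _ _ _ (le_refl _)] at hh
      exact hh
    · obtain ⟨hle, hpre, hmin⟩ :=
        PySem.Chars.findFrom_natCast_spec s ['\n'] i (by omega) hj
      have h0 : 0 ≤ PySem.Chars.findFrom s ['\n'] (i : Int) none :=
        le_trans (Int.natCast_nonneg i) hle
      have hmc : PySem.Chars.findFrom s ['\n'] (i : Int) none =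
          ((PySem.Chars.findFrom s ['\n'] (i : Int) none).toNat : Int) :=
        (Int.toNat_of_nonneg h0).symm
      obtain ⟨hmn, hnl⟩ := (pvPre1 s '\n' _).mp hpre
      have him : i ≤ (PySem.Chars.findFrom s ['\n'] (i : Int) none).toNat := by omega
      have hne0 : (PySem.Chars.findFrom s ['\n'] (i : Int) none).toNat ≠ i := by
        intro hh
        rw [hh, hc.1] at hnl
        exact absurd hnl (by decide)
      have hne1 : (PySem.Chars.findFrom s ['\n'] (i : Int) none).toNat ≠ i + 1 := by
        intro hh
        rw [hh, hc.2.2] at hnl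
        exact absurd hnl (by decide)
      have hm2 : i + 2 ≤ (PySem.Chars.findFrom s ['\n'] (i : Int) none).toNat := by omega
      have hno : ∀ p, i + 2 ≤ p →
          p < (PySem.Chars.findFrom s ['\n'] (i : Int) none).toNat →
          s.getD p ' ' ≠ '\n' := by
        intro p hp hpm heq
        exact hmin p (by omega) (by omega) ((pvPre1 s '\n' p).mpr ⟨by omega, heq⟩)
      rw [pvLineRun s (cu, pa, sq) (i + 2) _ hm2 (by omega) hno]
      have ebr : pvRun s (PySem.Chars.findFrom s ['\n'] (i : Int) none).toNat
          (PvSt.line, (cu, pa, sq)) =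
          pvRun s (PySem.Chars.findFrom s ['\n'] (i : Int) none).toNat
          (PvSt.code, (cu, pa, sq)) := by
        rw [pvRun_succ s _ _ hmn, pvRun_succ s _ _ hmn]
        have ea : pvStep (PvSt.line, (cu, pa, sq))
            (s.getD (PySem.Chars.findFrom s ['\n'] (i : Int) none).toNat ' ') =
            (PvSt.code, (cu, pa, sq)) := by
          simp only [pvStep]; rw [if_pos hnl]
        have eb : pvStep (PvSt.code, (cu, pa, sq))
            (s.getD (PySem.Chars.findFrom s ['\n'] (i : Int) none).toNat ' ') =
            (PvSt.code, (cu, pa, sq)) := by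
          simp only [pvStep]; rw [hnl]; simp [pvCodeStep]
        rw [ea, eb]
      rw [ebr, if_pos h0] at *
      exact ih cu pa sq (by omega)
  case case3 fuel i out h hc hc2 j ih =>
    intro cu pa sq hf
    rw [show j = PySem.Chars.findFrom s ['*', '/'] ((i : Int) + 2) none from rfl] at ih ⊢
    rw [show ((i : Int) + 2) = (((i + 2 : Nat)) : Int) by push_cast; ring] at ih ⊢
    rw [pvRun_succ s i _ h]
    have e1 : pvStep (PvSt.code, (cu, pa, sq)) (s.getD i ' ') =
        (PvSt.slash, (cu, pa, sq)) := by
      simp only [pvStep]; rw [hc2.1]; simp [pvCodeStep]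
    rw [e1, pvRun_succ s (i + 1) _ hc2.2.1]
    have e2 : pvStep (PvSt.slash, (cu, pa, sq)) (s.getD (i + 1) ' ') =
        (PvSt.block, (cu, pa, sq)) := by
      simp only [pvStep]; rw [hc2.2.2]; simp
    rw [e2]
    by_cases hj : PySem.Chars.findFrom s ['*', '/'] (((i + 2 : Nat)) : Int) none = -1
    · have hni : ¬(['*', '/'] <:+: s.drop (i + 2)) :=
        (PySem.Chars.findFrom_natCast_eq_neg_one_iff s ['*', '/'] (i + 2) (by omega)).mp hj
      have hno : ∀ p, i + 2 ≤ p → p + 1 < s.length →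
          ¬(s.getD p ' ' = '*' ∧ s.getD (p + 1) ' ' = '/') := by
        rintro p hp hpn ⟨ha, hb⟩
        exact hni (pvInfix2_of_getD s '*' '/' (i + 2) p (by omega) hpn ha hb)
      rw [(pvBlockRunAll s (cu, pa, sq) (i + 2) hno).1]
      rw [hj, if_neg (by norm_num)] at ih ⊢
      have hh := ih cu pa sq (by omega)
      rw [pvRun_ge _ _ _ (le_refl _)] at hh
      exact hh
    · obtain ⟨hle, hpre, hmin⟩ :=
        PySem.Chars.findFrom_natCast_spec s ['*', '/'] (i + 2) (by omega) hj
      have h0 : 0 ≤ PySem.Chars.findFrom s ['*', '/'] (((i + 2 : Nat)) : Int) none :=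
        le_trans (Int.natCast_nonneg (i + 2)) hle
      have hmc : PySem.Chars.findFrom s ['*', '/'] (((i + 2 : Nat)) : Int) none =
          ((PySem.Chars.findFrom s ['*', '/'] (((i + 2 : Nat)) : Int) none).toNat : Int) :=
        (Int.toNat_of_nonneg h0).symm
      obtain ⟨hmn, hstar, hslh⟩ := (pvPre2 s '*' '/' _).mp hpre
      have him : i + 2 ≤ (PySem.Chars.findFrom s ['*', '/'] (((i + 2 : Nat)) : Int) none).toNat := by
        omega
      have hno : ∀ p, i + 2 ≤ p →
          p < (PySem.Chars.findFrom s ['*', '/'] (((i + 2 : Nat)) : Int) none).toNat →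
          ¬(s.getD p ' ' = '*' ∧ s.getD (p + 1) ' ' = '/') := by
        rintro p hp hpm ⟨ha, hb⟩
        exact hmin p (by omega) (by omega) ((pvPre2 s '*' '/' p).mpr ⟨by omega, ha, hb⟩)
      rw [(pvBlockRun s (cu, pa, sq) (i + 2) _ him hmn hstar hslh hno).1]
      rw [if_pos h0] at ih ⊢
      exact ih cu pa sq (by omega)
  case case4 fuel i out h hc hc2 hc3 ih =>
    intro cu pa sq hf
    rw [pvRun_succ s i _ h]
    rcases hc3 with hq | hq
    · rw [hq] at ih ⊢
      have e : pvStep (PvSt.code, (cu, pa, sq)) '\'' =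
          (PvSt.str '\'' false 0, (cu, pa, sq)) := by
        simp [pvStep, pvCodeStep]
      rw [e, pvSkipRun s (s.length + 1) (i + 1) '\'' 0 cu pa sq (by omega), if_pos rfl]
      have hge := pvSkipStr_ge s (s.length + 1) (i + 1) '\''
      exact ih cu pa sq (by omega)
    · rw [hq] at ih ⊢
      have e : pvStep (PvSt.code, (cu, pa, sq)) '"' =
          (PvSt.str '"' false 0, (cu, pa, sq)) := by
        simp [pvStep, pvCodeStep]
      rw [e, pvSkipRun s (s.length + 1) (i + 1) '"' 0 cu pa sq (by omega), if_pos rfl]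
      have hge := pvSkipStr_ge s (s.length + 1) (i + 1) '"'
      exact ih cu pa sq (by omega)
  case case5 fuel i out h hc hc2 hc3 hc4 r ih =>
    intro cu pa sq hf
    rw [show r = pvBtA s (s.length + 1) (i + 1) out from rfl] at ih ⊢
    rw [pvRun_succ s i _ h]
    have e : pvStep (PvSt.code, (cu, pa, sq)) (s.getD i ' ') =
        (PvSt.tmpl false, (cu, pa, sq)) := by
      simp only [pvStep]; rw [hc4]; simp [pvCodeStep]
    rw [e, pvBtRun s (s.length + 1) (i + 1) out cu pa sq (by omega)]
    have hge := pvBtA_ge s (s.length + 1) (i + 1) out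
    rw [ih (cu + pvBal '{' '}' (pvBtA s (s.length + 1) (i + 1) out).2 - pvBal '{' '}' out)
      pa sq (by omega)]
    have hpar : pvBal '(' ')' (pvBtA s (s.length + 1) (i + 1) out).2 = pvBal '(' ')' out := by
      unfold pvBal
      rw [pvBtA_count s _ _ _ '(' (by decide) (by decide),
        pvBtA_count s _ _ _ ')' (by decide) (by decide)]
    have hsqr : pvBal '[' ']' (pvBtA s (s.length + 1) (i + 1) out).2 = pvBal '[' ']' out := by
      unfold pvBal
      rw [pvBtA_count s _ _ _ '[' (by decide) (by decide),
        pvBtA_count s _ _ _ ']' (by decide) (by decide)]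
    rw [hpar, hsqr]
    exact Prod.ext (by ring) (Prod.ext (by ring) (by ring))
  case case6 fuel i out h hc hc2 hc3 hc4 ih =>
    intro cu pa sq hf
    rw [pvRun_succ s i _ h]
    by_cases hsl : s.getD i ' ' = '/'
    · have hn1 : ¬(i + 1 < s.length ∧ s.getD (i + 1) ' ' = '/') :=
        fun hh => hc ⟨hsl, hh.1, hh.2⟩
      have hn2 : ¬(i + 1 < s.length ∧ s.getD (i + 1) ' ' = '*') :=
        fun hh => hc2 ⟨hsl, hh.1, hh.2⟩
      have e : pvStep (PvSt.code, (cu, pa, sq)) (s.getD i ' ') =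
          (PvSt.slash, (cu, pa, sq)) := by
        simp only [pvStep]; rw [hsl]; simp [pvCodeStep]
      rw [e]
      have hbridge : pvRun s (i + 1) (PvSt.slash, (cu, pa, sq)) =
          pvRun s (i + 1) (PvSt.code, (cu, pa, sq)) := by
        by_cases hnn : i + 1 < s.length
        · rw [pvRun_succ s (i + 1) _ hnn, pvRun_succ s (i + 1) _ hnn]
          have hx1 : s.getD (i + 1) ' ' ≠ '/' := fun hh => hn1 ⟨hnn, hh⟩
          have hx2 : s.getD (i + 1) ' ' ≠ '*' := fun hh => hn2 ⟨hnn, hh⟩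
          have e2 : pvStep (PvSt.slash, (cu, pa, sq)) (s.getD (i + 1) ' ') =
              pvCodeStep (s.getD (i + 1) ' ') cu pa sq := by
            simp only [pvStep]; rw [if_neg hx1, if_neg hx2]
          have e3 : pvStep (PvSt.code, (cu, pa, sq)) (s.getD (i + 1) ' ') =
              pvCodeStep (s.getD (i + 1) ' ') cu pa sq := by
            simp only [pvStep]
          rw [e2, e3]
        · rw [pvRun_ge _ _ _ (by omega), pvRun_ge _ _ _ (by omega)]
      rw [hbridge, ih cu pa sq (by omega), hsl,
        pvBal_other '{' '}' '/' out (by decide) (by decide),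
        pvBal_other '(' ')' '/' out (by decide) (by decide),
        pvBal_other '[' ']' '/' out (by decide) (by decide)]
    · have e : pvStep (PvSt.code, (cu, pa, sq)) (s.getD i ' ') =
          (PvSt.code,
            (cu + ((if s.getD i ' ' = '{' then 1 else 0) -
              (if s.getD i ' ' = '}' then 1 else 0)),
             pa + ((if s.getD i ' ' = '(' then 1 else 0) -
              (if s.getD i ' ' = ')' then 1 else 0)),
             sq + ((if s.getD i ' ' = '[' then 1 else 0) -
              (if s.getD i ' ' = ']' then 1 else 0)))) := by
        simp only [pvStep, pvCodeStep]
        rw [if_neg hsl, if_neg hc3, if_neg hc4]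
      rw [e, ih
        (cu + ((if s.getD i ' ' = '{' then 1 else 0) - (if s.getD i ' ' = '}' then 1 else 0)))
        (pa + ((if s.getD i ' ' = '(' then 1 else 0) - (if s.getD i ' ' = ')' then 1 else 0)))
        (sq + ((if s.getD i ' ' = '[' then 1 else 0) - (if s.getD i ' ' = ']' then 1 else 0)))
        (by omega),
        pvBal_append '{' '}' (s.getD i ' ') out,
        pvBal_append '(' ')' (s.getD i ' ') out,
        pvBal_append '[' ']' (s.getD i ' ') out]
      exact Prod.ext (by ring) (Prod.ext (by ring) (by ring))
  case case7 fuel i out h =>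
    intro cu pa sq hf
    rw [pvRun_ge _ _ _ (by omega)]
    exact Prod.ext (by ring) (Prod.ext (by ring) (by ring))

-- str.count with a single-character needle is List.count
theorem pvCount_go_single (c : Char) (l : List Char) : ∀ (f acc : Nat), l.length ≤ f →
    PySem.Chars.count.go [c] f l acc = acc + l.count c := by
  induction l with
  | nil =>
    intro f acc _
    cases f <;> simp [PySem.Chars.count.go]
  | cons a t ih =>
    intro f acc hf
    cases f with
    | zero => simp at hf
    | succ f =>
      rw [PySem.Chars.count.go]
      have ht : t.length ≤ f := by simpa using hf
      by_cases hca : c = a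
      · subst hca
        simp only [List.isPrefixOf, beq_self_eq_true, Bool.true_and,
          List.isPrefixOf_nil_left, if_true, List.length_cons, List.length_nil,
          List.drop_succ_cons, List.drop_zero]
        rw [ih f (acc + 1) ht]
        simp [List.count_cons]
        omega
      · have hpre : ([c].isPrefixOf (a :: t)) = false := by
          simp [List.isPrefixOf, hca]
        rw [hpre]
        simp only [Bool.false_eq_true, if_false]
        rw [ih f acc ht]
        have hca' : ¬(a = c) := fun hh => hca hh.symm
        simp [List.count_cons, hca, hca']

theorem pvCount_single (l : List Char) (c : Char) :
    PySem.Chars.count l [c] = l.count c := by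
  unfold PySem.Chars.count
  rw [if_neg (by simp), pvCount_go_single c l l.length 0 le_rfl]
  omega

-- ===== VERDICT (by name: the statement is the Claim_ definition above) =====
theorem strip_and_count_spec : Claim_equal_strip_and_count := by
  intro src _
  unfold Spec_strip_and_count strip_and_count strip_and_count_alt
  have h := pvMainRun src.toList (src.toList.length + 1) 0 [] 0 0 0 (by omega)
  rw [pvRun, List.drop_zero] at h
  rw [h]
  simp [PySem.Str.count_eq, pvCount_single, pvBal, String.toList_ofList]
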